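-- pv_equiv track=rewrite | github.com/akraeva/python-Badrutdinov-3-4 | src/module_3_2.py | m_3_2_3
-- ===== SOURCE A (Python) =====
-- def m_3_2_3(count=10):
--     if count < 1:
--         return ""
--     if count == 1:
--         return "0"
--     result = [0, 1]
--     while len(result) < count:
--         result.append(result[-1] + result[-2])
--     return "\n".join(map(str, result))
-- ===== SOURCE B (Python) =====
-- def m_3_2_3(count=10):
--     memo = {0: 0, 1: 1}
--
--     def fib(n):
--         if n not in memo:
--             memo[n] = fib(n - 1) + fib(n - 2)
--         return memo[n]
--
--     return "\n".join(str(fib(i)) for i in range(count))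
-- ===== Notes on version B (the rewrite author's own statement) =====
-- stated objective: alternative
-- what changed: Replaces A's bottom-up list growth with result[-1]/result[-2] back-references and two guard branches by top-down memoized recursion: a recursive fib(n) over a dict memo, joined over range(count), with no special-casing of short counts.
import Mathlib
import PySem

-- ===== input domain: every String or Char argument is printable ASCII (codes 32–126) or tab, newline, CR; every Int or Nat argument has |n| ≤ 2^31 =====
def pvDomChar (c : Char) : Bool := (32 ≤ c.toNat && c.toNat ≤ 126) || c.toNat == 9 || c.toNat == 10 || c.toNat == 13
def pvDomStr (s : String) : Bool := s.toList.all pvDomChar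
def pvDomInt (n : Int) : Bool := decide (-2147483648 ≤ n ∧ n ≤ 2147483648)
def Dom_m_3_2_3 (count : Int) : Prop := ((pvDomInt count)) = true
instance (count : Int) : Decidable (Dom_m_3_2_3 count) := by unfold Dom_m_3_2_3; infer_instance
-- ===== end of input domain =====

-- B replaces A's bottom-up list growth (result[-1]+result[-2], two guard branches) by
-- top-down memoized recursion fib(n) over a dict memo, joined over range(count) (alternative).

-- ===== PORT A =====
-- while len(result) < count: result.append(result[-1] + result[-2]);
-- the fuel (count - 2).toNat is exactly the number of iterations (length starts at 2, grows by 1).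
def pvAWhile : Nat → List Int → List Int
  | 0, result => result
  | n + 1, result =>
      pvAWhile n (result ++ [(PySem.List.pyGet? result (-1)).getD 0 +
                             (PySem.List.pyGet? result (-2)).getD 0])

def m_3_2_3 (count : Int) : String :=
  if count < 1 then ""
  else if count = 1 then "0"
  else PySem.Str.join "\n" ((pvAWhile (count - 2).toNat [0, 1]).map PySem.Int.toStr)

-- ===== PORT B =====
-- def fib(n): if n not in memo: memo[n] = fib(n-1) + fib(n-2); return memo[n]
-- (the n = 0 / n = 1 fallthrough branches are termination guards only: 0 and 1 are in memo from the start)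
def pvFib (n : Nat) (memo : PySem.Dict Int Int) : Int × PySem.Dict Int Int :=
  match PySem.Dict.get? memo (n : Int) with
    | some v => (v, memo)
    | none =>
      match n with
      | 0 => (0, memo)
      | 1 => (1, memo)
      | m + 2 =>
        let r1 := pvFib (m + 1) memo
        let r2 := pvFib m r1.2
        let memo' := PySem.Dict.insert r2.2 ((m + 2 : Nat) : Int) (r1.1 + r2.1)
        ((PySem.Dict.get? memo' ((m + 2 : Nat) : Int)).getD 0, memo')

-- one step of the generator "str(fib(i)) for i in range(count)", threading memo
def pvBStep (st : PySem.Dict Int Int × List String) (i : Int) :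
    PySem.Dict Int Int × List String :=
  let r := pvFib i.toNat st.1
  (r.2, st.2 ++ [PySem.Int.toStr r.1])

def m_3_2_3_alt (count : Int) : String :=
  PySem.Str.join "\n"
    (((PySem.List.pyRange 0 count 1).foldl pvBStep (PySem.Dict.ofList [(0, 0), (1, 1)], [])).2)

-- ===== PRECONDITION & SPEC =====
def Spec_m_3_2_3 (count : Int) (out : String) : Prop := out = m_3_2_3_alt count
instance (count : Int) (out : String) : Decidable (Spec_m_3_2_3 count out) := by unfold Spec_m_3_2_3; infer_instance

-- ===== CLAIM (what is proved, stated in full; the proofs are below) =====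
def Claim_equal_m_3_2_3 : Prop := ∀ (count : Int), Dom_m_3_2_3 count → Spec_m_3_2_3 count (m_3_2_3 count)

-- ===== LEMMAS AND PROOFS =====

-- the mathematical Fibonacci sequence both programs compute
def fibZ : Nat → Int
  | 0 => 0
  | 1 => 1
  | n + 2 => fibZ (n + 1) + fibZ n

-- invariant on B's memo dict: 0 and 1 are present, every Nat key maps to its Fibonacci value
def pvInv (memo : PySem.Dict Int Int) : Prop :=
  memo.get? 0 = some 0 ∧ memo.get? 1 = some 1 ∧
    ∀ (k : Nat) (v : Int), memo.get? (k : Int) = some v → v = fibZ k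

-- manual equation lemmas for pvFib (the compiler's eq_def keeps the match unreduced)
theorem pvFib_hit (n : Nat) (memo : PySem.Dict Int Int) (v : Int)
    (h : PySem.Dict.get? memo (n : Int) = some v) : pvFib n memo = (v, memo) := by
  rw [pvFib.eq_def, h]

theorem pvFib_miss2 (m : Nat) (memo : PySem.Dict Int Int)
    (h : PySem.Dict.get? memo ((m + 2 : Nat) : Int) = none) :
    pvFib (m + 2) memo =
      (((PySem.Dict.insert (pvFib m (pvFib (m + 1) memo).2).2 ((m + 2 : Nat) : Int)
          ((pvFib (m + 1) memo).1 + (pvFib m (pvFib (m + 1) memo).2).1)).get?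
          ((m + 2 : Nat) : Int)).getD 0,
       PySem.Dict.insert (pvFib m (pvFib (m + 1) memo).2).2 ((m + 2 : Nat) : Int)
          ((pvFib (m + 1) memo).1 + (pvFib m (pvFib (m + 1) memo).2).1)) := by
  rw [pvFib.eq_def, h]

theorem pvFib_correct (n : Nat) : ∀ (memo : PySem.Dict Int Int), pvInv memo →
    (pvFib n memo).1 = fibZ n ∧ pvInv (pvFib n memo).2 := by
  induction n using Nat.strong_induction_on with
  | _ n ih =>
    intro memo hI
    obtain ⟨h0, h1, hk⟩ := hI
    cases hget : PySem.Dict.get? memo (n : Int) with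
    | some v =>
      rw [pvFib_hit n memo v hget]
      exact ⟨hk n v hget, h0, h1, hk⟩
    | none =>
      match n with
      | 0 => simp only [Int.natCast_zero] at hget; rw [hget] at h0; cases h0
      | 1 => simp only [Int.natCast_one] at hget; rw [hget] at h1; cases h1
      | m + 2 =>
        obtain ⟨e1, I1⟩ := ih (m + 1) (by omega) memo ⟨h0, h1, hk⟩
        obtain ⟨e2, I2⟩ := ih m (by omega) (pvFib (m + 1) memo).2 I1
        obtain ⟨g0, g1, gk⟩ := I2
        rw [pvFib_miss2 m memo hget]
        refine ⟨?_, ?_, ?_, ?_⟩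
        · simp only [PySem.Dict.get?_insert_self, Option.getD_some, e1, e2, fibZ]
        · rw [PySem.Dict.get?_insert_of_ne _ _ (show (0 : Int) ≠ ((m + 2 : Nat) : Int) by push_cast; omega)]
          exact g0
        · rw [PySem.Dict.get?_insert_of_ne _ _ (show (1 : Int) ≠ ((m + 2 : Nat) : Int) by push_cast; omega)]
          exact g1
        · intro k v hv
          rw [PySem.Dict.get?_insert] at hv
          split at hv
          · rename_i hkeq
            have hke : k = m + 2 := by exact_mod_cast hkeq
            subst hke
            simp only [Option.some.injEq] at hv
            simp [← hv, e1, e2, fibZ]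
          · exact gk k v hv

theorem pvLoop (l : List Int) : ∀ (memo : PySem.Dict Int Int) (parts : List String),
    pvInv memo →
    (l.foldl pvBStep (memo, parts)).2 =
      parts ++ l.map (fun i => PySem.Int.toStr (fibZ i.toNat)) ∧
    pvInv (l.foldl pvBStep (memo, parts)).1 := by
  induction l with
  | nil => intro memo parts hI; exact ⟨by simp, hI⟩
  | cons i t ih =>
    intro memo parts hI
    obtain ⟨e, I⟩ := pvFib_correct i.toNat memo hI
    have := ih (pvFib i.toNat memo).2 (parts ++ [PySem.Int.toStr (pvFib i.toNat memo).1]) I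
    simpa [pvBStep, e] using this

theorem pvInv_memo0 : pvInv (PySem.Dict.ofList [(0, 0), (1, 1)]) := by
  have h : PySem.Dict.ofList ([(0, 0), (1, 1)] : List (Int × Int)) =
      (PySem.Dict.empty.insert 0 0).insert 1 1 := by decide
  rw [h]
  refine ⟨by decide, by decide, ?_⟩
  intro k v hv
  rw [PySem.Dict.get?_insert] at hv
  split at hv
  · rename_i hk
    have hk0 : k = 1 := by exact_mod_cast hk
    subst hk0
    simp only [Option.some.injEq] at hv
    simp [fibZ, ← hv]
  · rw [PySem.Dict.get?_insert] at hv
    split at hv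
    · rename_i _ hk
      have hk0 : k = 0 := by exact_mod_cast hk
      subst hk0
      simp only [Option.some.injEq] at hv
      simp [fibZ, ← hv]
    · simp [PySem.Dict.get?_empty] at hv

-- B's joined list is the Fibonacci prefix
theorem pvB_eq (count : Int) :
    m_3_2_3_alt count =
      PySem.Str.join "\n" ((List.range count.toNat).map (fun k => PySem.Int.toStr (fibZ k))) := by
  unfold m_3_2_3_alt
  rw [(pvLoop (PySem.List.pyRange 0 count 1) _ [] pvInv_memo0).1]
  simp only [List.nil_append]
  congr 1
  rw [PySem.List.pyRange_one, List.map_map]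
  simp [Function.comp]

-- A-side lemmas (the while loop appends the rolling sums)
theorem pvGet_neg1 (res : List Int) (x y : Int) :
    PySem.List.pyGet? (res ++ [x, y]) (-1) = some y := by
  have : res ++ [x, y] = (res ++ [x]) ++ [y] := by simp
  rw [this, PySem.List.pyGet?_neg_one_append_singleton]

theorem pvGet_neg2 (res : List Int) (x y : Int) :
    PySem.List.pyGet? (res ++ [x, y]) (-2) = some x := by
  rw [PySem.List.pyGet?_neg_ofNat _ 2 (by norm_num) (by simp)]
  simp

def pvFibList : Nat → Int → Int → List Int
  | 0, _, _ => []
  | n + 1, a, b => a :: pvFibList n b (a + b)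

theorem pvAWhile_eq (n : Nat) : ∀ (res : List Int) (x y : Int),
    pvAWhile n (res ++ [x, y]) = res ++ [x, y] ++ pvFibList n (y + x) ((y + x) + y) := by
  induction n with
  | zero => intro res x y; simp [pvAWhile, pvFibList]
  | succ n ih =>
      intro res x y
      have h1 : pvAWhile (n + 1) (res ++ [x, y]) =
          pvAWhile n ((res ++ [x]) ++ [y, y + x]) := by
        simp [pvAWhile, pvGet_neg1, pvGet_neg2]
      rw [h1, ih]
      simp [pvFibList]
      ring_nf

theorem pvFibList_eq_range (n : Nat) : ∀ (k : Nat),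
    pvFibList n (fibZ k) (fibZ (k + 1)) = (List.range n).map (fun i => fibZ (k + i)) := by
  induction n with
  | zero => intro k; simp [pvFibList]
  | succ n ih =>
    intro k
    have hsum : fibZ k + fibZ (k + 1) = fibZ (k + 2) := by
      simp [fibZ]; ring
    rw [List.range_succ_eq_map]
    simp only [pvFibList, hsum, List.map_cons, List.map_map]
    congr 1
    rw [ih (k + 1)]
    refine List.map_congr_left ?_
    intro i _
    simp only [Function.comp_apply]
    congr 1
    omega

-- ===== VERDICT (by name: the statement is the Claim_ definition above) =====
theorem m_3_2_3_spec : Claim_equal_m_3_2_3 := by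
  intro count _
  unfold Spec_m_3_2_3
  rw [pvB_eq]
  unfold m_3_2_3
  by_cases h1 : count < 1
  · have h0 : count.toNat = 0 := by omega
    rw [if_pos h1, h0]
    decide
  · by_cases h2 : count = 1
    · subst h2
      decide
    · have hn : count.toNat = (count - 2).toNat + 2 := by omega
      rw [if_neg h1, if_neg h2]
      have hA := pvAWhile_eq (count - 2).toNat [] 0 1
      simp only [List.nil_append] at hA
      rw [hA]
      congr 1
      rw [show ((1 : Int) + 0 + 1) = fibZ (2 + 1) from by decide,
          show ((1 : Int) + 0) = fibZ 2 from by decide,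
          pvFibList_eq_range (count - 2).toNat 2]
      rw [show (fun k => PySem.Int.toStr (fibZ k)) = (PySem.Int.toStr ∘ fibZ) from rfl,
          ← List.map_map]
      congr 1
      rw [hn, Nat.add_comm _ 2, List.range_add]
      simp [List.range_succ, List.map_map, fibZ, Function.comp]
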